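-- pv_equiv track=rewrite | github.com/ekoka/code-drills | lc/202408/1509.py | solution_heap
-- ===== SOURCE A (Python) =====
-- import heapq
--
-- def solution_heap(nums):
--     if len(nums) <= 4:
--         return 0
--     nlargest = heapq.nlargest(4, nums)
--     nsmallest = heapq.nsmallest(4, nums)
--     rv = float('inf')
--     i = 0
--     for i in range(4):
--         k = 3 - i
--         test = nlargest[i] - nsmallest[k]
--         rv = rv if rv < test else test
--     return rv
-- ===== SOURCE B (Python) =====
-- def solution_heap(nums):
--     if len(nums) <= 4:
--         return 0
--     s = sorted(nums)
--     return min(s[-4] - s[0], s[-3] - s[1], s[-2] - s[2], s[-1] - s[3])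
-- ===== Notes on version B (the rewrite author's own statement) =====
-- stated objective: simpler
-- what changed: Replaces the heap-based partial selection (nlargest/nsmallest) and the explicit min-accumulator loop over range(4) with one full C-level sort and a single min() of the four fixed end-window differences s[-4+j]-s[j].
import Mathlib
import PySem

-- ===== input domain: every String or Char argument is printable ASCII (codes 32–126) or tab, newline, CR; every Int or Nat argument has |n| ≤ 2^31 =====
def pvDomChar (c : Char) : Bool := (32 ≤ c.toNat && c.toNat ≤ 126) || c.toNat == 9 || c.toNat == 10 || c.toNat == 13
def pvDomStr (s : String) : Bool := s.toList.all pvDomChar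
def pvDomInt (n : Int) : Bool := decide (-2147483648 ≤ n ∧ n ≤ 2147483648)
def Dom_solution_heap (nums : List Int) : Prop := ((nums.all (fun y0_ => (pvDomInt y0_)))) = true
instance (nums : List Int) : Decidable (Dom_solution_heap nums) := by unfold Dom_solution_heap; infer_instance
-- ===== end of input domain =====

-- B replaces A's heap-based partial selection (nlargest/nsmallest) and its min-accumulator
-- loop by one full sort and a single min of the four end-window differences (objective: simpler).

-- ===== PORT A =====
-- heapq.nlargest(4, nums) is value-equal to sorted(nums, reverse=True)[:4] and
-- heapq.nsmallest(4, nums) to sorted(nums)[:4] (documented heapq semantics; Int elements, so ties are identical values).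
-- rv starts at float('inf'), modelled as `none`: 'rv if rv < test else test' with rv = inf yields test,
-- which is exactly the `none` branch. The loop over range(4) is non-empty, so rv is `some` at the end;
-- the final `.getD 0` only makes that read total.
def solution_heap (nums : List Int) : Int :=
  if nums.length ≤ 4 then 0
  else
    let nlargest := (PySem.List.sorted nums (fun x => x) true).take 4
    let nsmallest := (PySem.List.sorted nums (fun x => x) false).take 4
    let rv : Option Int := (PySem.List.pyRange 0 4 1).foldl
      (fun rv i =>
        let k := 3 - i
        let test := PySem.List.pyGetD nlargest i 0 - PySem.List.pyGetD nsmallest k 0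
        match rv with
        | none => some test
        | some r => some (if r < test then r else test)) none
    rv.getD 0

-- ===== PORT B =====
-- min(a, b, c, d) on Ints is the left-nested binary min. All eight indices are in range
-- (the branch runs only with len ≥ 5), so pyGetD's default 0 is never used.
def solution_heap_alt (nums : List Int) : Int :=
  if nums.length ≤ 4 then 0
  else
    let s := PySem.List.sorted nums (fun x => x) false
    min (min (min (PySem.List.pyGetD s (-4) 0 - PySem.List.pyGetD s 0 0)
                  (PySem.List.pyGetD s (-3) 0 - PySem.List.pyGetD s 1 0))
             (PySem.List.pyGetD s (-2) 0 - PySem.List.pyGetD s 2 0))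
        (PySem.List.pyGetD s (-1) 0 - PySem.List.pyGetD s 3 0)

-- ===== PRECONDITION & SPEC =====
def Spec_solution_heap (nums : List Int) (out : Int) : Prop := out = solution_heap_alt nums
instance (nums : List Int) (out : Int) : Decidable (Spec_solution_heap nums out) := by unfold Spec_solution_heap; infer_instance

-- ===== CLAIM (what is proved, stated in full; the proofs are below) =====
def Claim_equal_solution_heap : Prop := ∀ (nums : List Int), Dom_solution_heap nums → Spec_solution_heap nums (solution_heap nums)

-- ===== LEMMAS AND PROOFS =====

-- sorted descending equals the reverse of sorted ascending (Int elements: equal values are identical)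
theorem sorted_rev_eq_reverse_sorted (xs : List Int) :
    PySem.List.sorted xs (fun x => x) true = (PySem.List.sorted xs (fun x => x) false).reverse := by
  apply PySem.List.eq_of_perm_of_pairwise_le_of_injective (fun x : Int => -x) neg_injective
  · exact (PySem.List.sorted_perm xs _ true).trans
      ((PySem.List.sorted_perm xs _ false).symm.trans (List.reverse_perm _).symm)
  · simpa using PySem.List.sorted_pairwise_rev xs (fun x => x)
  · rw [List.pairwise_reverse]
    simpa using PySem.List.sorted_pairwise xs (fun x => x)

-- negative Python index: s[-k] = s[len(s) - k]
theorem pyGetD_neg_lit (s : List Int) (k : Nat) (hk : 0 < k) (h : k ≤ s.length) :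
    PySem.List.pyGetD s (-(k : Int)) 0 = s[s.length - k]?.getD 0 := by
  simp only [PySem.List.pyGetD, PySem.List.pyGet?, PySem.List.pyIdx?]
  rw [if_neg (by omega), if_pos (by omega)]
  simp

-- ===== VERDICT (by name: the statement is the Claim_ definition above) =====
theorem solution_heap_spec : Claim_equal_solution_heap := by
  intro nums _
  unfold Spec_solution_heap solution_heap solution_heap_alt
  by_cases hle : nums.length ≤ 4
  · simp [hle]
  · rw [if_neg hle, if_neg hle, sorted_rev_eq_reverse_sorted]
    set s := PySem.List.sorted nums (fun x => x) false with hs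
    have hlen := (PySem.List.sorted_perm nums (fun x => x) false).length_eq
    rw [← hs] at hlen
    have hn : 4 < s.length := by omega
    rw [show PySem.List.pyRange 0 4 1 = [0, 1, 2, 3] from rfl]
    simp only [List.foldl]
    norm_num [PySem.List.pyGetD_ofNat', List.getD_eq_getElem?_getD, List.getElem?_take]
    have hv : ∀ k : Nat, 0 < k → k ≤ s.length →
        PySem.List.pyGetD s (-(k : Int)) 0 = s[s.length - k]?.getD 0 := fun k hk h =>
      pyGetD_neg_lit s k hk h
    have hv4 := hv 4 (by omega) (by omega)
    have hv3 := hv 3 (by omega) (by omega)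
    have hv2 := hv 2 (by omega) (by omega)
    have hv1 := hv 1 (by omega) (by omega)
    norm_num at hv4 hv3 hv2 hv1
    rw [hv4, hv3, hv2, hv1]
    have hR : ∀ i : Nat, i < 4 → s.reverse[i]? = s[s.length - 1 - i]? := fun i hi =>
      List.getElem?_reverse (by omega)
    rw [hR 0 (by omega), hR 1 (by omega), hR 2 (by omega), hR 3 (by omega),
        show s.length - 1 - 0 = s.length - 1 by omega, show s.length - 1 - 1 = s.length - 2 by omega,
        show s.length - 1 - 2 = s.length - 3 by omega, show s.length - 1 - 3 = s.length - 4 by omega]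
    generalize s[s.length - 1]?.getD 0 = A1
    generalize s[s.length - 2]?.getD 0 = A2
    generalize s[s.length - 3]?.getD 0 = A3
    generalize s[s.length - 4]?.getD 0 = A4
    generalize s[0]?.getD 0 = B0
    generalize s[1]?.getD 0 = B1
    generalize s[2]?.getD 0 = B2
    generalize s[3]?.getD 0 = B3
    split_ifs <;> omega
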